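-- pv_equiv track=rewrite | github.com/jiva-z/Programmers | 프로그래머스/2/138476. 귤 고르기/귤 고르기.py | solution
-- ===== SOURCE A (Python) =====
-- def solution(k, tangerine):
--     tangerineCount = {}
--
--     for i in range(len(tangerine)):
--         if tangerine[i] in tangerineCount:
--             tangerineCount[tangerine[i]] += 1
--         else:
--             tangerineCount[tangerine[i]] = 1
--
--     # 개수가 많은 순서대로 정렬
--     sorted_sizes = sorted(tangerineCount.values(), reverse=True)
--
--     # 귤을 선택
--     total = 0
--     kinds = 0
--     for count in sorted_sizes:
--         if total < k:
--             total += count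
--             kinds += 1
--         else:
--             break
--
--     return kinds
-- ===== SOURCE B (Python) =====
-- def solution(k, tangerine):
--     cnt = {}
--     for t in tangerine:
--         cnt[t] = cnt.get(t, 0) + 1
--     n = len(tangerine)
--     bucket = [0] * (n + 1)
--     for c in cnt.values():
--         bucket[c] += 1
--     total = 0
--     kinds = 0
--     for c in range(n, 0, -1):
--         for _ in range(bucket[c]):
--             if total >= k:
--                 return kinds
--             total += c
--             kinds += 1
--     return kinds
-- ===== Notes on version B (the rewrite author's own statement) =====
-- stated objective: alternative
-- what changed: Replaces the comparison sort of the frequency values plus greedy scan by a counting-sort bucket pass: a histogram over count values is built and scanned from the largest count down, consuming kinds one at a time.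
import Mathlib
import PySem

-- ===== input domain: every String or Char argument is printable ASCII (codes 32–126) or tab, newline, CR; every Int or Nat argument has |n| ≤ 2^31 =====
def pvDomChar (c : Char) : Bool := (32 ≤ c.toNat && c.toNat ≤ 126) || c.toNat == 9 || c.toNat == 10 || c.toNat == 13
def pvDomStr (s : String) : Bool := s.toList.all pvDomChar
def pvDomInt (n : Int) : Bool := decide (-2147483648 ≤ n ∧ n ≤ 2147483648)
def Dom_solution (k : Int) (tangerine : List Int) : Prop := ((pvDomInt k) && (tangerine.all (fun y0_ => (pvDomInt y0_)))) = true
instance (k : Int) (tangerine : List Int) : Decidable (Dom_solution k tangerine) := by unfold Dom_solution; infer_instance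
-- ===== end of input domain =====

-- B replaces A's comparison sort of the frequency values + greedy scan by a counting-sort
-- bucket pass over count values scanned from the largest count down (objective: alternative).

-- ===== PORT A =====
-- A's 'for count in sorted_sizes: if total < k: … else: break' loop
def greedyA (k : Int) : List Int → Int → Int → Int
  | [], _, kinds => kinds
  | c :: rest, total, kinds =>
      if total < k then greedyA k rest (total + c) (kinds + 1) else kinds

def solution (k : Int) (tangerine : List Int) : Int :=
  let tangerineCount := (PySem.List.pyRange 0 (tangerine.length : Int) 1).foldl
    (fun d i =>
      let x := PySem.List.pyGetD tangerine i 0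
      if d.contains x then d.modify x 0 (· + 1) else d.insert x 1)
    PySem.Dict.empty
  let sorted_sizes := PySem.List.sorted tangerineCount.values (fun v => v) true
  greedyA k sorted_sizes 0 0

-- ===== PORT B =====
-- 'bucket[c] += 1'; c is always a genuine occurrence count, i.e. 1 ≤ c ≤ len(bucket)-1,
-- so plain Nat indexing is exact here.
def bumpB (bucket : List Int) (c : Int) : List Int :=
  bucket.set c.toNat (bucket.getD c.toNat 0 + 1)

-- the inner 'for _ in range(bucket[c])' loop with its early 'return kinds' (.inl)
def innerB (k c : Int) : Nat → Int → Int → Sum Int (Int × Int)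
  | 0, total, kinds => .inr (total, kinds)
  | r + 1, total, kinds =>
      if total ≥ k then .inl kinds else innerB k c r (total + c) (kinds + 1)

-- the outer 'for c in range(n, 0, -1)' loop
def outerB (k : Int) (bucket : List Int) : Nat → Int → Int → Int
  | 0, _, kinds => kinds
  | c + 1, total, kinds =>
      match innerB k ((c : Int) + 1) (bucket.getD (c + 1) 0).toNat total kinds with
      | .inl kinds' => kinds'
      | .inr (t, ki) => outerB k bucket c t ki

def solution_alt (k : Int) (tangerine : List Int) : Int :=
  let cnt := tangerine.foldl (fun d t => d.insert t (d.getD t 0 + 1)) PySem.Dict.empty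
  let n := tangerine.length
  let bucket := cnt.values.foldl bumpB (List.replicate (n + 1) 0)
  outerB k bucket n 0 0

-- ===== PRECONDITION & SPEC =====
def Spec_solution (k : Int) (tangerine : List Int) (out : Int) : Prop := out = solution_alt k tangerine
instance (k : Int) (tangerine : List Int) (out : Int) : Decidable (Spec_solution k tangerine out) := by unfold Spec_solution; infer_instance

-- ===== CLAIM (what is proved, stated in full; the proofs are below) =====
def Claim_equal_solution : Prop := ∀ (k : Int) (tangerine : List Int), Dom_solution k tangerine → Spec_solution k tangerine (solution k tangerine)

-- ===== LEMMAS AND PROOFS =====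

lemma stepA (d : PySem.Dict Int Int) (x : Int) :
    (if d.contains x then d.modify x 0 (· + 1) else d.insert x 1) = d.modify x 0 (· + 1) := by
  by_cases h : d.contains x
  · simp [h]
  · simp only [Bool.not_eq_true] at h
    simp [h, PySem.Dict.insert, PySem.Dict.modify, PySem.Dict.getD_of_not_contains d 0 h]

lemma foldlA_eq (xs : List Int) :
    xs.foldl (fun d x => if d.contains x then d.modify x 0 (· + 1) else d.insert x 1)
      PySem.Dict.empty = PySem.Dict.counter xs := by
  rw [PySem.Dict.counter_eq_foldl]
  congr 1
  funext d x
  exact stepA d x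

lemma dictA (xs : List Int) :
    ((PySem.List.pyRange 0 (xs.length : Int) 1).foldl
      (fun d i =>
        let x := PySem.List.pyGetD xs i 0
        if d.contains x then d.modify x 0 (· + 1) else d.insert x 1)
      PySem.Dict.empty) = PySem.Dict.counter xs := by
  have h := PySem.List.foldl_pyRange_pyGetD xs 0
      (fun (d : PySem.Dict Int Int) x => if d.contains x then d.modify x 0 (· + 1) else d.insert x 1)
      PySem.Dict.empty (le_refl 0)
  simp only [PySem.List.len, Int.toNat_zero, List.drop_zero] at h
  exact h.trans (foldlA_eq xs)

lemma values_counter (xs : List Int) :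
    (PySem.Dict.counter xs).values = (PySem.Set.ofList xs).map (fun x => (xs.count x : Int)) := by
  simp [PySem.Dict.values, PySem.Dict.items_counter, List.map_map, Function.comp]

lemma values_counter_bounds (xs : List Int) (v : Int) (hv : v ∈ (PySem.Dict.counter xs).values) :
    1 ≤ v ∧ v ≤ (xs.length : Int) := by
  rw [values_counter] at hv
  obtain ⟨x, hx, rfl⟩ := List.mem_map.mp hv
  have hx' : x ∈ xs := (PySem.Set.mem_ofList xs x).mp hx
  have h1 := List.count_pos_iff.mpr hx'
  have h2 := List.count_le_length (l := xs) (a := x)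
  omega

lemma bucket_getD (vs : List Int) (b0 : List Int) (j : Nat) (hj : j < b0.length)
    (hvs : ∀ v ∈ vs, 0 ≤ v ∧ v.toNat < b0.length) :
    (vs.foldl bumpB b0).getD j 0 = b0.getD j 0 + vs.count (j : Int) := by
  induction vs generalizing b0 with
  | nil => simp
  | cons v vs ih =>
    obtain ⟨hv0, hvlt⟩ := hvs v (by simp)
    have hlen : (bumpB b0 v).length = b0.length := by simp [bumpB]
    have ihh := ih (bumpB b0 v) (by omega)
      (fun w hw => by have := hvs w (by simp [hw]); omega)
    simp only [List.foldl_cons, ihh, List.count_cons]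
    by_cases h : v = (j : Int)
    · subst h
      have hj' : j < b0.length := by simpa using hvlt
      simp [bumpB, List.getD_eq_getElem?_getD, List.getElem?_set_eq_of_lt _ hj']
      omega
    · have hne : v.toNat ≠ j := by omega
      simp [bumpB, List.getD_eq_getElem?_getD, List.getElem?_set_ne hne, h]

def expandB (bucket : List Int) : Nat → List Int
  | 0 => []
  | c + 1 => List.replicate (bucket.getD (c + 1) 0).toNat ((c : Int) + 1) ++ expandB bucket c

lemma inner_greedy (k c : Int) (r : Nat) (rest : List Int) (t ki : Int) :
    greedyA k (List.replicate r c ++ rest) t ki =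
      (match innerB k c r t ki with
       | .inl ki' => ki'
       | .inr (t', ki') => greedyA k rest t' ki') := by
  induction r generalizing t ki with
  | zero => simp [innerB]
  | succ r ih =>
    simp only [List.replicate_succ, List.cons_append, greedyA, innerB]
    by_cases h : t < k
    · rw [if_pos h, if_neg (by omega), ih]
    · rw [if_neg h, if_pos (by omega)]

lemma outer_greedy (k : Int) (bucket : List Int) (c : Nat) (t ki : Int) :
    outerB k bucket c t ki = greedyA k (expandB bucket c) t ki := by
  induction c generalizing t ki with
  | zero => simp [outerB, expandB, greedyA]
  | succ c ih =>
    simp only [outerB, expandB, inner_greedy]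
    cases innerB k ((c : Int) + 1) (bucket.getD (c + 1) 0).toNat t ki with
    | inl ki' => simp
    | inr p => simp [ih]

lemma mem_expandB_le (bucket : List Int) (c : Nat) (x : Int) (hx : x ∈ expandB bucket c) :
    x ≤ (c : Int) := by
  induction c with
  | zero => simp [expandB] at hx
  | succ c ih =>
    simp only [expandB, List.mem_append] at hx
    rcases hx with hx | hx
    · have := List.eq_of_mem_replicate hx
      omega
    · have := ih hx
      push_cast
      omega

lemma expandB_pairwise (bucket : List Int) (c : Nat) :
    (expandB bucket c).Pairwise (fun a b => b ≤ a) := by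
  induction c with
  | zero => simp [expandB]
  | succ c ih =>
    rw [expandB, List.pairwise_append]
    refine ⟨List.pairwise_replicate.mpr (by simp), ih, ?_⟩
    intro a ha b hb
    have ha' := List.eq_of_mem_replicate ha
    have hb' := mem_expandB_le bucket c b hb
    subst ha'
    push_cast at hb' ⊢
    omega

def expandC (vs : List Int) : Nat → List Int
  | 0 => []
  | c + 1 => List.replicate (vs.count ((c : Int) + 1)) ((c : Int) + 1) ++ expandC vs c

lemma expandC_congr (vs ws : List Int) (n : Nat)
    (h : ∀ c : Nat, 1 ≤ c → c ≤ n → vs.count (c : Int) = ws.count (c : Int)) :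
    expandC vs n = expandC ws n := by
  induction n with
  | zero => rfl
  | succ n ih =>
    have hcnt := h (n + 1) (by omega) (le_refl _)
    push_cast at hcnt
    rw [expandC, expandC, hcnt, ih (fun c h1 h2 => h c h1 (by omega))]

lemma expandC_perm (vs : List Int) (n : Nat) (h : ∀ v ∈ vs, 1 ≤ v ∧ v ≤ (n : Int)) :
    (expandC vs n).Perm vs := by
  induction n generalizing vs with
  | zero =>
    have : vs = [] := by
      cases vs with
      | nil => rfl
      | cons v vs => have := h v (by simp); omega
    simp [this, expandC]
  | succ n ih =>
    have hfilter : vs.filter (· == ((n : Int) + 1)) =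
        List.replicate (vs.count ((n : Int) + 1)) ((n : Int) + 1) := List.filter_beq _
    have hperm := List.filter_append_perm (· == ((n : Int) + 1)) vs
    set vs' := vs.filter (fun v => !(v == ((n : Int) + 1))) with hvs'
    have hbound : ∀ v ∈ vs', 1 ≤ v ∧ v ≤ (n : Int) := by
      intro v hv
      rw [hvs', List.mem_filter] at hv
      obtain ⟨hv1, hv2⟩ := hv
      have := h v hv1
      have : v ≠ (n : Int) + 1 := by simpa using hv2
      omega
    have hcnt : ∀ c : Nat, 1 ≤ c → c ≤ n → vs.count (c : Int) = vs'.count (c : Int) := by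
      intro c h1 h2
      rw [hvs', List.count_filter (by simp; omega)]
    have e1 : expandC vs (n + 1) =
        vs.filter (· == ((n : Int) + 1)) ++ expandC vs' n := by
      rw [expandC, hfilter, expandC_congr vs vs' n hcnt]
    rw [e1]
    exact (((ih vs' hbound).append_left _).trans hperm)

lemma expandB_eq_expandC (vs : List Int) (n : Nat)
    (hvs : ∀ v ∈ vs, 1 ≤ v ∧ v ≤ (n : Int)) (c : Nat) (hc : c ≤ n) :
    expandB (vs.foldl bumpB (List.replicate (n + 1) 0)) c = expandC vs c := by
  induction c with
  | zero => rfl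
  | succ c ih =>
    have hget := bucket_getD vs (List.replicate (n + 1) 0) (c + 1)
      (by rw [List.length_replicate]; omega)
      (fun v hv => by
        have := hvs v hv
        rw [List.length_replicate]
        omega)
    rw [expandB, expandC, ih (by omega)]
    congr 1
    rw [hget]
    have : (List.replicate (n + 1) (0 : Int)).getD (c + 1) 0 = 0 := by
      simp [List.getD_eq_getElem?_getD, List.getElem?_replicate]
      split <;> simp
    rw [this, zero_add]
    push_cast
    simp

lemma expandB_eq_sorted (vs : List Int) (n : Nat)
    (hvs : ∀ v ∈ vs, 1 ≤ v ∧ v ≤ (n : Int)) :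
    expandB (vs.foldl bumpB (List.replicate (n + 1) 0)) n =
      PySem.List.sorted vs (fun v => v) true := by
  have hperm : (expandB (vs.foldl bumpB (List.replicate (n + 1) 0)) n).Perm
      (PySem.List.sorted vs (fun v => v) true) := by
    rw [expandB_eq_expandC vs n hvs n (le_refl n)]
    exact (expandC_perm vs n hvs).trans (PySem.List.sorted_perm vs (fun v => v) true).symm
  exact hperm.eq_of_pairwise (fun a b _ _ h1 h2 => le_antisymm h2 h1)
    (expandB_pairwise _ n) (PySem.List.sorted_pairwise_rev vs (fun v => v))

-- ===== VERDICT (by name: the statement is the Claim_ definition above) =====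
theorem solution_spec : Claim_equal_solution := by
  intro k xs _
  show solution k xs = solution_alt k xs
  have hA : solution k xs =
      greedyA k (PySem.List.sorted (PySem.Dict.counter xs).values (fun v => v) true) 0 0 :=
    congrArg (fun d : PySem.Dict Int Int =>
      greedyA k (PySem.List.sorted d.values (fun v => v) true) 0 0) (dictA xs)
  have hB : solution_alt k xs =
      outerB k ((PySem.Dict.counter xs).values.foldl bumpB
        (List.replicate (xs.length + 1) 0)) xs.length 0 0 :=
    congrArg (fun d : PySem.Dict Int Int =>
      outerB k (d.values.foldl bumpB (List.replicate (xs.length + 1) 0)) xs.length 0 0)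
      (PySem.Dict.foldl_insert_getD_add_one_eq_counter xs)
  rw [hA, hB, outer_greedy,
    expandB_eq_sorted (PySem.Dict.counter xs).values xs.length (values_counter_bounds xs)]
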